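-- pv_equiv track=rewrite | github.com/DeNeutoy/allennlp | allennlp/data/dataset_readers/wic.py | _convert_indices_to_wordpiece_indices
-- ===== SOURCE A (Python) =====
-- from typing import Dict, Tuple, List
--
-- def _convert_indices_to_wordpiece_indices(indices: List[int], offsets: List[int]):
--     j = 0
--     new_verb_indices = []
--     for i, offset in enumerate(offsets):
--         indicator = indices[i]
--         while j < offset:
--             new_verb_indices.append(indicator)
--             j += 1
--
--     # Add 0 indicators for cls and sep tokens.
--     return [0] + new_verb_indices + [0]
-- ===== SOURCE B (Python) =====
-- from typing import Dict, Tuple, List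
--
-- def _convert_indices_to_wordpiece_indices(indices: List[int], offsets: List[int]):
--     # Inverted traversal: iterate over output positions. Wordpiece position p is
--     # labelled by indices[i] for the FIRST i whose offset exceeds p.
--     length = max([0] + offsets)
--     body = [indices[next(i for i, off in enumerate(offsets) if off > p)]
--             for p in range(length)]
--     return [0] + body + [0]
-- ===== Notes on version B (the rewrite author's own statement) =====
-- stated objective: alternative
-- what changed: B inverts the traversal: instead of emitting blocks per offset with a persistent counter, it iterates over output positions p in range(max offset) and labels each p with indices[i] of the first offset exceeding p.
import Mathlib
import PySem

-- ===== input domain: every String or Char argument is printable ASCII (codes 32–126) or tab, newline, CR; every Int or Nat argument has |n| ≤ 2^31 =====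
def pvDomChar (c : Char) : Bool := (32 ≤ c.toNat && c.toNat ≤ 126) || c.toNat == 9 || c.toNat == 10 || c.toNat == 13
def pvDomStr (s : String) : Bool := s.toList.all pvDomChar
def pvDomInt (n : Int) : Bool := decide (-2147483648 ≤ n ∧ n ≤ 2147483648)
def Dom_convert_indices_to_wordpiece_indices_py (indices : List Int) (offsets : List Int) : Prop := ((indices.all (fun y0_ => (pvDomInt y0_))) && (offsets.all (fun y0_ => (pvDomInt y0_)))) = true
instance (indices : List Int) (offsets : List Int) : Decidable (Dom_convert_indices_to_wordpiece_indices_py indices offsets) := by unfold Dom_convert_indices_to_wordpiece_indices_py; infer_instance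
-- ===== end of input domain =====

-- B inverts the traversal: instead of emitting blocks per offset with a persistent
-- counter, it iterates over the output positions p and labels each with indices[i]
-- of the first offset exceeding p (alternative algorithm, same results).

-- ===== PORT A =====
-- 'while j < offset: append(indicator); j += 1' — returns the appended elements and the final j
def pvWhileA (indicator j offset : Int) : List Int × Int :=
  if j < offset then
    let r := pvWhileA indicator (j + 1) offset
    (indicator :: r.1, r.2)
  else ([], j)
termination_by (offset - j).toNat
decreasing_by omega

-- the 'for i, offset in enumerate(offsets)' loop; indices[i] via pyGetD (Pre_ rules out IndexError)
def pvLoopA (indices : List Int) (i : Nat) (j : Int) (offsets : List Int) (acc : List Int) : List Int :=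
  match offsets with
  | [] => acc
  | offset :: rest =>
    let indicator := PySem.List.pyGetD indices (i : Int) 0
    let w := pvWhileA indicator j offset
    pvLoopA indices (i + 1) w.2 rest (acc ++ w.1)

def convert_indices_to_wordpiece_indices_py (indices : List Int) (offsets : List Int) : List Int :=
  [0] ++ pvLoopA indices 0 0 offsets [] ++ [0]

-- ===== PORT B =====
-- length = max([0] + offsets); per output position p, the first i with offsets[i] > p
def convert_indices_to_wordpiece_indices_py_alt (indices : List Int) (offsets : List Int) : List Int :=
  let length := List.foldl max 0 offsets   -- max([0] + offsets)
  let body := (List.range length.toNat).map (fun (p : Nat) =>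
    PySem.List.pyGetD indices ((offsets.findIdx (fun off => decide ((p : Int) < off)) : Nat) : Int) 0)
  [0] ++ body ++ [0]

-- ===== PRECONDITION & SPEC =====
-- Pre_ excludes exactly the inputs on which A's indices[i] raises IndexError:
-- offsets longer than indices.
def Pre_convert_indices_to_wordpiece_indices_py (indices : List Int) (offsets : List Int) : Prop :=
  offsets.length ≤ indices.length
instance (indices : List Int) (offsets : List Int) : Decidable (Pre_convert_indices_to_wordpiece_indices_py indices offsets) := by unfold Pre_convert_indices_to_wordpiece_indices_py; infer_instance

def pvWitness_convert_indices_to_wordpiece_indices_py : List Int × List Int := ([1, 0, 1], [2, 3, 5])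

def Spec_convert_indices_to_wordpiece_indices_py (indices : List Int) (offsets : List Int) (out : List Int) : Prop := out = convert_indices_to_wordpiece_indices_py_alt indices offsets
instance (indices : List Int) (offsets : List Int) (out : List Int) : Decidable (Spec_convert_indices_to_wordpiece_indices_py indices offsets out) := by unfold Spec_convert_indices_to_wordpiece_indices_py; infer_instance

-- ===== CLAIM (what is proved, stated in full; the proofs are below) =====
def Claim_equal_convert_indices_to_wordpiece_indices_py : Prop := ∀ (indices : List Int) (offsets : List Int), Dom_convert_indices_to_wordpiece_indices_py indices offsets → Pre_convert_indices_to_wordpiece_indices_py indices offsets → Spec_convert_indices_to_wordpiece_indices_py indices offsets (convert_indices_to_wordpiece_indices_py indices offsets)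

-- ===== LEMMAS AND PROOFS =====

-- Proof helper: A's loop in running-max/replicate form.
def pvLoopH (indices : List Int) (i : Nat) (j : Int) (offsets : List Int) (out : List Int) : List Int :=
  match offsets with
  | [] => out
  | offset :: rest =>
    let indicator := PySem.List.pyGetD indices (i : Int) 0
    pvLoopH indices (i + 1) (max j offset) rest
      (out ++ List.replicate (max 0 (offset - j)).toNat indicator)

-- Proof helper: the positions j..(running max) labelled by first exceeding offset.
def pvSeg (indices : List Int) (i : Nat) (j : Int) (offsets : List Int) : List Int :=
  (List.range ((List.foldl max j offsets) - j).toNat).map (fun (k : Nat) =>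
    PySem.List.pyGetD indices ((i + offsets.findIdx (fun off => decide (j + (k : Int) < off)) : Nat) : Int) 0)

theorem pvWhileA_eq (indicator j offset : Int) :
    pvWhileA indicator j offset = (List.replicate (offset - j).toNat indicator, max j offset) := by
  fun_induction pvWhileA indicator j offset with
  | case1 j hlt r ih =>
    have hr : r = (List.replicate (offset - (j + 1)).toNat indicator, max (j + 1) offset) := ih
    rw [hr]
    have h1 : (offset - j).toNat = (offset - (j + 1)).toNat + 1 := by omega
    have h2 : max (j + 1) offset = max j offset := by omega
    simp [h1, h2, List.replicate_succ]
  | case2 j hge =>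
    have h1 : (offset - j).toNat = 0 := by omega
    have h2 : max j offset = j := by omega
    simp [h1, h2]

theorem pvLoopA_eq_H (offsets : List Int) : ∀ (indices : List Int) (i : Nat) (j : Int) (acc : List Int),
    pvLoopA indices i j offsets acc = pvLoopH indices i j offsets acc := by
  induction offsets with
  | nil => intro _ _ _ _; rfl
  | cons offset rest ih =>
    intro indices i j acc
    rw [pvLoopA, pvLoopH, pvWhileA_eq, ih]
    have h : (max 0 (offset - j)).toNat = (offset - j).toNat := by omega
    simp [h]

theorem le_foldl_max (offsets : List Int) : ∀ j : Int, j ≤ List.foldl max j offsets := by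
  induction offsets with
  | nil => intro j; simp
  | cons offset rest ih =>
    intro j
    calc j ≤ max j offset := le_max_left _ _
    _ ≤ List.foldl max (max j offset) rest := ih _

theorem pvLoopH_eq_seg (offsets : List Int) : ∀ (indices : List Int) (i : Nat) (j : Int) (out : List Int),
    pvLoopH indices i j offsets out = out ++ pvSeg indices i j offsets := by
  induction offsets with
  | nil => intro _ _ _ _; simp [pvLoopH, pvSeg]
  | cons offset rest ih =>
    intro indices i j out
    rw [pvLoopH, ih]
    rw [List.append_assoc]
    congr 1
    -- replicate block ++ pvSeg (i+1) (max j offset) rest = pvSeg i j (offset :: rest)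
    have hM : max j offset ≤ List.foldl max (max j offset) rest := le_foldl_max rest _
    set M := List.foldl max (max j offset) rest with hMdef
    have hfold : List.foldl max j (offset :: rest) = M := by simp [List.foldl, hMdef]
    set c : Nat := (max 0 (offset - j)).toNat with hc
    have hsplit : (M - j).toNat = c + (M - max j offset).toNat := by omega
    unfold pvSeg
    rw [hfold, hsplit, List.range_add, List.map_append, List.map_map]
    congr 1
    · -- first c positions: head offset exceeds them
      have : ∀ k ∈ List.range c,
          PySem.List.pyGetD indices ((i + (offset :: rest).findIdx (fun off => decide (j + (k : Int) < off)) : Nat) : Int) 0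
            = PySem.List.pyGetD indices (i : Int) 0 := by
        intro k hk
        have hk' : k < c := List.mem_range.mp hk
        have hlt : j + (k : Int) < offset := by omega
        rw [List.findIdx_cons]
        simp [hlt]
      rw [List.map_congr_left this]
      simp [List.map_const']
    · -- remaining positions: head offset fails, shift to the tail
      refine List.map_congr_left ?_
      intro k hk
      simp only [Function.comp_apply]
      have hval : j + ((c + k : Nat) : Int) = max j offset + (k : Int) := by
        push_cast; omega
      have hge : ¬ (j + ((c + k : Nat) : Int) < offset) := by
        push_cast; omega
      rw [List.findIdx_cons]
      simp only [hge, decide_false, cond_false]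
      have hpred : (fun off => decide (j + ((c + k : Nat) : Int) < off))
          = (fun off => decide (max j offset + (k : Int) < off)) := by
        funext off; rw [hval]
      rw [hpred]
      congr 1
      push_cast
      ring

-- ===== VERDICT (by name: the statement is the Claim_ definition above) =====
theorem convert_indices_to_wordpiece_indices_py_spec : Claim_equal_convert_indices_to_wordpiece_indices_py := by
  intro indices offsets _ _
  unfold Spec_convert_indices_to_wordpiece_indices_py convert_indices_to_wordpiece_indices_py convert_indices_to_wordpiece_indices_py_alt
  rw [pvLoopA_eq_H, pvLoopH_eq_seg]
  simp only [List.nil_append, pvSeg, Int.sub_zero]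
  refine congrArg (fun l => (0 : Int) :: (l ++ [0])) ?_
  refine List.map_congr_left ?_
  intro k _
  simp
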